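-- pv_equiv track=rewrite | github.com/kevinXmichael/codewars | python/strip_comments.py | solution
-- ===== SOURCE A (Python) =====
-- def solution(string, markers):
--     sentences = []
--     for sentence in string.split("\n"):
--         sentence_clean = sentence
--         for idx, char in enumerate(sentence):
--             if char in markers:
--                 sentence_clean = sentence[:idx]
--                 break
--         sentences.append(sentence_clean.strip())
--     return "\n".join(sentences)
-- ===== SOURCE B (Python) =====
-- def solution(string, markers):
--     lines = []
--     buf = []
--     skipping = False
--     for ch in string:
--         if ch == "\n":
--             lines.append("".join(buf).strip())
--             buf = []
--             skipping = False
--         elif not skipping: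
--             if ch in markers:
--                 skipping = True
--             else:
--                 buf.append(ch)
--     lines.append("".join(buf).strip())
--     return "\n".join(lines)
-- ===== Notes on version B (the rewrite author's own statement) =====
-- stated objective: alternative
-- what changed: Replaces A's split-into-lines plus per-line indexed scan with slicing by a single streaming pass over the whole string that keeps a per-line buffer and a skip-until-newline flag, flushing the stripped buffer at each newline.
import Mathlib
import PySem

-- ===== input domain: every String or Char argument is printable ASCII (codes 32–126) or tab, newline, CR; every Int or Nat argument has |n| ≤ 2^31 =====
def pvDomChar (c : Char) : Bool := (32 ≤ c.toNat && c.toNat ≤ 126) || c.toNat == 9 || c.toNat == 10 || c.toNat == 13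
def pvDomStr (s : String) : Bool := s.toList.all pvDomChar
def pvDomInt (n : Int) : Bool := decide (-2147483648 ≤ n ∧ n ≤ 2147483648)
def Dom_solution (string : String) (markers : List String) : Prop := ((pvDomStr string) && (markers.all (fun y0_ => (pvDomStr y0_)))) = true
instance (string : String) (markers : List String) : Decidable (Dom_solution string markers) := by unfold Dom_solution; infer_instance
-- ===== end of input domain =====

-- B replaces A's split-into-lines + per-line indexed scan-and-slice by a single streaming
-- pass over the string with a per-line buffer and a skip flag (objective: alternative).

-- ===== PORT A =====
-- inner 'for idx, char in enumerate(sentence): if char in markers: …; break' loop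
def pvAScan (markers : List String) (sentence : List Char) : List (Int × Char) → List Char
  | [] => sentence
  | (idx, c) :: rest =>
      if String.ofList [c] ∈ markers then PySem.Chars.slice sentence none (some idx)
      else pvAScan markers sentence rest

def solution (string : String) (markers : List String) : String :=
  String.ofList (PySem.Chars.join ['\n']
    ((PySem.Chars.splitOn string.toList ['\n']).map (fun sentence =>
      PySem.Chars.strip (pvAScan markers sentence (PySem.List.enumerate sentence 0)))))

-- ===== PORT B =====
-- loop body: flush the buffer on '\n'; otherwise, unless skipping, either start
-- skipping at a marker character or append the character to the buffer
def pvBStep (markers : List String) (st : List (List Char) × List Char × Bool) (ch : Char) :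
    List (List Char) × List Char × Bool :=
  if ch = '\n' then (st.1 ++ [PySem.Chars.strip st.2.1], [], false)
  else if !st.2.2 then
    if String.ofList [ch] ∈ markers then (st.1, st.2.1, true)
    else (st.1, st.2.1 ++ [ch], st.2.2)
  else st

def solution_alt (string : String) (markers : List String) : String :=
  let st := string.toList.foldl (pvBStep markers) ([], [], false)
  String.ofList (PySem.Chars.join ['\n'] (st.1 ++ [PySem.Chars.strip st.2.1]))

-- ===== PRECONDITION & SPEC =====
def Spec_solution (string : String) (markers : List String) (out : String) : Prop := out = solution_alt string markers
instance (string : String) (markers : List String) (out : String) : Decidable (Spec_solution string markers out) := by unfold Spec_solution; infer_instance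

-- ===== CLAIM (what is proved, stated in full; the proofs are below) =====
def Claim_equal_solution : Prop := ∀ (string : String) (markers : List String), Dom_solution string markers → Spec_solution string markers (solution string markers)

-- ===== LEMMAS AND PROOFS =====

-- a character is a "marker char" iff it equals a (single-character) element of markers
def pvMark (markers : List String) (c : Char) : Bool := decide (String.ofList [c] ∈ markers)

-- reference split of a list of chars on one separator character
def pvSplitCh (c : Char) : List Char → List (List Char)
  | [] => [[]]
  | a :: l =>
      if a = c then [] :: pvSplitCh c l
      else
        match pvSplitCh c l with
        | [] => [[a]]
        | h :: t => (a :: h) :: t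

lemma pvSplitCh_ne_nil (c : Char) (l : List Char) : pvSplitCh c l ≠ [] := by
  cases l with
  | nil => simp [pvSplitCh]
  | cons a l =>
    by_cases h : a = c
    · simp [pvSplitCh, h]
    · simp only [pvSplitCh, if_neg h]
      cases pvSplitCh c l <;> simp

lemma pvSplitOn_go_eq (c : Char) (fuel : Nat) :
    ∀ (l cur : List Char) (acc : List (List Char)), l.length ≤ fuel →
      PySem.Chars.splitOn.go [c] fuel l cur acc =
        acc.reverse ++ (pvSplitCh c l).modifyHead (cur.reverse ++ ·) := by
  induction fuel with
  | zero =>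
    intro l cur acc hlen
    have : l = [] := List.length_eq_zero_iff.mp (Nat.le_zero.mp hlen)
    subst this
    simp [PySem.Chars.splitOn.go, pvSplitCh]
  | succ fuel ih =>
    intro l cur acc hlen
    cases l with
    | nil => simp [PySem.Chars.splitOn.go, pvSplitCh]
    | cons a l =>
      by_cases h : a = c
      · subst h
        have hpre : [a].isPrefixOf (a :: l) = true := by simp [List.isPrefixOf]
        simp only [PySem.Chars.splitOn.go, hpre, if_true, List.length_cons, List.drop_succ_cons]
        simp only [List.length_nil, List.drop_zero]
        rw [ih l [] _ (by simpa using Nat.lt_succ_iff.mp (by simpa using hlen))]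
        simp only [pvSplitCh, List.modifyHead]
        cases pvSplitCh a l <;> simp
      · have hpre : [c].isPrefixOf (a :: l) = false := by
          simp [List.isPrefixOf]
          exact fun hc => absurd hc.symm h
        simp only [PySem.Chars.splitOn.go, hpre, Bool.false_eq_true, if_false]
        rw [ih l (a :: cur) acc (by simpa using Nat.lt_succ_iff.mp (by simpa using hlen))]
        simp only [pvSplitCh, if_neg h]
        rcases hsp : pvSplitCh c l with _ | ⟨hd, tl⟩
        · exact absurd hsp (pvSplitCh_ne_nil c l)
        · simp [List.modifyHead]

lemma pvSplitOn_eq (c : Char) (l : List Char) :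
    PySem.Chars.splitOn l [c] = pvSplitCh c l := by
  unfold PySem.Chars.splitOn
  rw [pvSplitOn_go_eq c (l.length + 1) l [] [] (Nat.le_succ _)]
  rcases hsp : pvSplitCh c l with _ | ⟨hd, tl⟩
  · exact absurd hsp (pvSplitCh_ne_nil c l)
  · simp [List.modifyHead]

-- A's inner loop on an enumerated line, closed form (first marker position)
lemma pvAScan_enum (markers : List String) (l t : List Char) (s : Nat) :
    pvAScan markers l (PySem.List.enumerate t (s : Int)) =
      if t.any (pvMark markers) then l.take (s + t.findIdx (pvMark markers)) else l := by
  induction t generalizing s with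
  | nil => simp [pvAScan, PySem.List.enumerate]
  | cons c t ih =>
    rw [PySem.List.enumerate_cons]
    by_cases h : String.ofList [c] ∈ markers
    · simp [pvAScan, h, pvMark, List.findIdx_cons, PySem.List.slice_to_natCast]
    · have hcast : ((s : Int) + 1) = ((s + 1 : Nat) : Int) := by push_cast; ring
      have harith : s + 1 + t.findIdx (pvMark markers) = s + (t.findIdx (pvMark markers) + 1) := by omega
      simp only [pvAScan, if_neg h, hcast, ih, List.any_cons, List.findIdx_cons, pvMark]
      simp [h, harith, pvMark]

-- A's per-line cut is exactly 'take while not a marker char'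
lemma pvAScan_takeWhile (markers : List String) (l : List Char) :
    pvAScan markers l (PySem.List.enumerate l 0) = l.takeWhile (fun c => !pvMark markers c) := by
  have h0 : (0 : Int) = ((0 : Nat) : Int) := rfl
  rw [h0, pvAScan_enum]
  by_cases h : l.any (pvMark markers)
  · rw [if_pos h, List.takeWhile_eq_take_findIdx_not]
    simp
  · rw [if_neg h, List.takeWhile_eq_self_iff.mpr]
    intro x hx
    simp only [Bool.not_eq_eq_eq_not, Bool.not_true]
    exact Bool.eq_false_iff.mpr (fun hm => h (List.any_eq_true.mpr ⟨x, hx, hm⟩))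

-- the list of output lines B produces from the remaining input, given the current buffer / skip flag
def pvLineOuts (markers : List String) (buf : List Char) (skip : Bool) :
    List (List Char) → List (List Char)
  | [] => []
  | h :: t =>
      PySem.Chars.strip (buf ++ (if skip then [] else h.takeWhile (fun c => !pvMark markers c))) ::
        t.map (fun s => PySem.Chars.strip (s.takeWhile (fun c => !pvMark markers c)))

lemma pvFold_eq (markers : List String) (l : List Char) :
    ∀ (lines : List (List Char)) (buf : List Char) (skip : Bool),
      (l.foldl (pvBStep markers) (lines, buf, skip)).1 ++
          [PySem.Chars.strip (l.foldl (pvBStep markers) (lines, buf, skip)).2.1] =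
        lines ++ pvLineOuts markers buf skip (pvSplitCh '\n' l) := by
  induction l with
  | nil => intro lines buf skip; simp [pvSplitCh, pvLineOuts]
  | cons a l ih =>
    intro lines buf skip
    by_cases hnl : a = '\n'
    · subst hnl
      simp only [List.foldl_cons, pvBStep, if_true]
      rw [ih]
      simp only [pvSplitCh, if_true]
      rcases hsp : pvSplitCh '\n' l with _ | ⟨hd, tl⟩
      · exact absurd hsp (pvSplitCh_ne_nil '\n' l)
      · simp [pvLineOuts, List.append_assoc]
    · rcases hsp : pvSplitCh '\n' l with _ | ⟨hd, tl⟩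
      · exact absurd hsp (pvSplitCh_ne_nil '\n' l)
      cases skip with
      | true =>
        simp only [List.foldl_cons, pvBStep, if_neg hnl, Bool.not_true, Bool.false_eq_true,
          if_false]
        rw [ih]
        simp [pvSplitCh, if_neg hnl, hsp, pvLineOuts]
      | false =>
        by_cases hm : String.ofList [a] ∈ markers
        · simp only [List.foldl_cons, pvBStep, if_neg hnl, Bool.not_false, if_true, if_pos hm]
          rw [ih]
          have hma : pvMark markers a = true := by simp [pvMark, hm]
          simp [pvSplitCh, if_neg hnl, hsp, pvLineOuts, hma]
        · simp only [List.foldl_cons, pvBStep, if_neg hnl, Bool.not_false, if_true, if_neg hm]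
          rw [ih]
          have hma : pvMark markers a = false := by simp [pvMark, hm]
          simp [pvSplitCh, if_neg hnl, hsp, pvLineOuts, hma]

-- B's output lines from the empty start state are exactly the per-line cuts
lemma pvLineOuts_start (markers : List String) (ls : List (List Char)) :
    pvLineOuts markers [] false ls =
      ls.map (fun s => PySem.Chars.strip (s.takeWhile (fun c => !pvMark markers c))) := by
  cases ls <;> simp [pvLineOuts]

-- ===== VERDICT (by name: the statement is the Claim_ definition above) =====
theorem solution_spec : Claim_equal_solution := by
  intro string markers _
  unfold Spec_solution solution solution_alt
  show _ = String.ofList (PySem.Chars.join ['\n']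
    ((string.toList.foldl (pvBStep markers) ([], [], false)).1 ++
      [PySem.Chars.strip (string.toList.foldl (pvBStep markers) ([], [], false)).2.1]))
  rw [pvFold_eq markers string.toList [] [] false, pvLineOuts_start, List.nil_append,
    pvSplitOn_eq]
  congr 1
  apply congrArg
  apply List.map_congr_left
  intro l _
  rw [pvAScan_takeWhile]
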